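-- pv_equiv track=rewrite | github.com/llgeek/leetcode | CharitableGiving/solution.py | charitiableGiving
-- ===== SOURCE A (Python) =====
-- import heapq
--
-- def charitiableGiving(values):
--     """
--     type values: list of int
--     rtype: list of 'A', 'B', 'C'
--     """
--     if len(values) <= 3:
--         return ['A', 'B', 'C'][:len(values)]
--     gives = []
--     heapq.heappush(gives, (values[0], 0))
--     heapq.heappush(gives, (values[1], 1))
--     heapq.heappush(gives, (values[2], 2))
--     res = ['A', 'B', 'C']
--     for val in values[3:]:
--         top = heapq.heappop(gives)
--         heapq.heappush(gives, (top[0] + val, top[1]))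
--         res.append(chr(ord('A') + top[1]))
--     return res
-- ===== SOURCE B (Python) =====
-- def charitiableGiving(values):
--     """
--     type values: list of int
--     rtype: list of 'A', 'B', 'C'
--     """
--     if len(values) <= 3:
--         return ['A', 'B', 'C'][:len(values)]
--     a, b, c = values[0], values[1], values[2]
--     res = ['A', 'B', 'C']
--     for val in values[3:]:
--         if a <= b and a <= c:
--             a += val
--             res.append('A')
--         elif b <= c:
--             b += val
--             res.append('B')
--         else:
--             c += val
--             res.append('C')
--     return res
-- ===== Notes on version B (the rewrite author's own statement) =====
-- stated objective: simpler
-- what changed: Replaced the heapq priority queue of (sum, index) tuples by three plain running bucket sums updated with a direct lowest-index-minimum comparison.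
import Mathlib
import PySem

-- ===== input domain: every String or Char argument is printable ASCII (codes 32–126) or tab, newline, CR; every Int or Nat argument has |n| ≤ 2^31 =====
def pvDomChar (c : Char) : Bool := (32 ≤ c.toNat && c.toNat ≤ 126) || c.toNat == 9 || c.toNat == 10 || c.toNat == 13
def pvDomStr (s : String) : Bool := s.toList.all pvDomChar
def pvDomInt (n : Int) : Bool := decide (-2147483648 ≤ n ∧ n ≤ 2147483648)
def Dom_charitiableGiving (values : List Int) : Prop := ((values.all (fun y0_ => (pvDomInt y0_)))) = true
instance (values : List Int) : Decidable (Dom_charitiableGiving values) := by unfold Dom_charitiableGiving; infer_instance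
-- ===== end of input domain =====

-- B replaces A's heapq priority queue by three running bucket sums updated with a
-- direct lowest-index-min branch (objective: simpler).

-- ===== PORT A =====
-- Python tuple comparison on (sum, index) pairs, as used by heapq.
def pyLt (x y : Int × Int) : Bool := x.1 < y.1 || (x.1 == y.1 && x.2 < y.2)

-- heapq.heappush: exact CPython sift-down behaviour for heaps of size 0, 1 and 2
-- (the only sizes heappush is applied to in this program, whose heap holds ≤ 3 items).
def heappush (h : List (Int × Int)) (x : Int × Int) : List (Int × Int) :=
  match h with
  | [] => [x]
  | [a] => if pyLt x a then [x, a] else [a, x]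
  | [a, b] => if pyLt x a then [x, b, a] else [a, b, x]
  | _ => h ++ [x]  -- unreachable here (heap never exceeds 2 elements before a push)

-- heapq.heappop: exact CPython behaviour for heaps of size 3 (the only size popped here);
-- [] would raise IndexError in Python and is unreachable in this program.
def heappop (h : List (Int × Int)) : (Int × Int) × List (Int × Int) :=
  match h with
  | [] => ((0, 0), [])
  | [a] => (a, [])
  | [a, b] => (a, [b])
  | a :: b :: c :: rest => (a, if pyLt c b then c :: b :: rest else b :: c :: rest)

-- chr(ord('A') + i) for i ∈ {0,1,2}
def idxChar (i : Int) : String := String.ofList [Char.ofNat ('A'.toNat + i.toNat)]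

-- the for-loop of A as a recursion over values[3:]
def loopA (g : List (Int × Int)) (res : List String) : List Int → List String
  | [] => res
  | v :: rest =>
    let top := (heappop g).1
    loopA (heappush (heappop g).2 (top.1 + v, top.2)) (res ++ [idxChar top.2]) rest

def charitiableGiving (values : List Int) : List String :=
  if values.length ≤ 3 then (["A", "B", "C"].take values.length)
  else
    match values with
    | v0 :: v1 :: v2 :: rest =>
      loopA (heappush (heappush (heappush [] (v0, 0)) (v1, 1)) (v2, 2)) ["A", "B", "C"] rest
    | _ => []  -- unreachable: length > 3

-- ===== PORT B =====
-- the for-loop of B as a recursion over values[3:], carrying the three bucket sums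
def loopB (a b c : Int) (res : List String) : List Int → List String
  | [] => res
  | v :: rest =>
    if a ≤ b ∧ a ≤ c then loopB (a + v) b c (res ++ ["A"]) rest
    else if b ≤ c then loopB a (b + v) c (res ++ ["B"]) rest
    else loopB a b (c + v) (res ++ ["C"]) rest

def charitiableGiving_alt (values : List Int) : List String :=
  if values.length ≤ 3 then (["A", "B", "C"].take values.length)
  else
    -- values[0], values[1], values[2], values[3:]; the defaults are unreachable (length > 3)
    loopB (values.getD 0 0) (values.getD 1 0) (values.getD 2 0) ["A", "B", "C"] (values.drop 3)

-- ===== PRECONDITION & SPEC =====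
def Spec_charitiableGiving (values : List Int) (out : List String) : Prop := out = charitiableGiving_alt values
instance (values : List Int) (out : List String) : Decidable (Spec_charitiableGiving values out) := by unfold Spec_charitiableGiving; infer_instance

-- ===== CLAIM (what is proved, stated in full; the proofs are below) =====
def Claim_equal_charitiableGiving : Prop := ∀ (values : List Int), Dom_charitiableGiving values → Spec_charitiableGiving values (charitiableGiving values)

-- ===== LEMMAS AND PROOFS =====

-- Invariant: the heap holds exactly the pairs (a,0),(b,1),(c,2) with the lexicographic
-- minimum at the root; the two non-root elements may appear in either order.
def HeapInv (h : List (Int × Int)) (a b c : Int) : Prop :=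
  (h = [(a, 0), (b, 1), (c, 2)] ∧ a ≤ b ∧ a ≤ c) ∨
  (h = [(a, 0), (c, 2), (b, 1)] ∧ a ≤ b ∧ a ≤ c) ∨
  (h = [(b, 1), (a, 0), (c, 2)] ∧ b < a ∧ b ≤ c) ∨
  (h = [(b, 1), (c, 2), (a, 0)] ∧ b < a ∧ b ≤ c) ∨
  (h = [(c, 2), (a, 0), (b, 1)] ∧ c < a ∧ c < b) ∨
  (h = [(c, 2), (b, 1), (a, 0)] ∧ c < a ∧ c < b)

lemma init_inv (a b c : Int) :
    HeapInv (heappush (heappush (heappush [] (a, 0)) (b, 1)) (c, 2)) a b c := by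
  simp only [heappush, pyLt, HeapInv]
  split_ifs <;> simp_all <;> omega

lemma idxChar_A : idxChar 0 = "A" := by decide
lemma idxChar_B : idxChar 1 = "B" := by decide
lemma idxChar_C : idxChar 2 = "C" := by decide

lemma loop_eq (rest : List Int) : ∀ (h : List (Int × Int)) (a b c : Int) (res : List String),
    HeapInv h a b c → loopA h res rest = loopB a b c res rest := by
  induction rest with
  | nil => intros; rfl
  | cons v rest ih =>
    intro h a b c res hI
    rcases hI with ⟨rfl, h1, h2⟩ | ⟨rfl, h1, h2⟩ | ⟨rfl, h1, h2⟩ | ⟨rfl, h1, h2⟩ | ⟨rfl, h1, h2⟩ | ⟨rfl, h1, h2⟩ <;>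
      simp only [loopA, loopB, heappop, heappush, pyLt, idxChar_A, idxChar_B, idxChar_C] <;>
      split_ifs <;> simp_all <;>
      first
      | (apply ih; simp only [HeapInv]; simp_all; omega)
      | omega

-- ===== VERDICT (by name: the statement is the Claim_ definition above) =====
theorem charitiableGiving_spec : Claim_equal_charitiableGiving := by
  intro values _
  unfold Spec_charitiableGiving charitiableGiving charitiableGiving_alt
  split_ifs with hlen
  · rfl
  · match values, hlen with
    | v0 :: v1 :: v2 :: rest, _ =>
      simpa using loop_eq rest _ v0 v1 v2 _ (init_inv v0 v1 v2)
    | [], hlen => simp at hlen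
    | [x], hlen => simp at hlen
    | [x, y], hlen => simp at hlen
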